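-- pv_equiv track=rewrite | github.com/Lenson423/neo4j | create_clusters.py | get_messages_by_token_limit
-- ===== SOURCE A (Python) =====
-- def get_messages_by_token_limit(messages, token_limit=70000):
--     current_group = []
--     current_tokens = 0
--
--     for message in messages:
--         tokens = len(message)
--
--         if current_tokens + tokens <= token_limit:
--             current_group.append(message)
--             current_tokens += tokens
--         else:
--             break
--     return current_group
-- ===== SOURCE B (Python) =====
-- def get_messages_by_token_limit(messages, token_limit=70000):
--     sums = []
--     total = 0
--     for m in messages:
--         total += len(m)
--         sums.append(total)
--     k = sum(1 for s in sums if s <= token_limit)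
--     return messages[:k]
-- ===== Notes on version B (the rewrite author's own statement) =====
-- stated objective: alternative
-- what changed: Replaces the early-break running-total accumulator with a prefix-sum list, a count of prefix sums within the limit, and a slice of the input; correctness relies on lengths being non-negative so prefix sums are monotone.
import Mathlib
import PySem

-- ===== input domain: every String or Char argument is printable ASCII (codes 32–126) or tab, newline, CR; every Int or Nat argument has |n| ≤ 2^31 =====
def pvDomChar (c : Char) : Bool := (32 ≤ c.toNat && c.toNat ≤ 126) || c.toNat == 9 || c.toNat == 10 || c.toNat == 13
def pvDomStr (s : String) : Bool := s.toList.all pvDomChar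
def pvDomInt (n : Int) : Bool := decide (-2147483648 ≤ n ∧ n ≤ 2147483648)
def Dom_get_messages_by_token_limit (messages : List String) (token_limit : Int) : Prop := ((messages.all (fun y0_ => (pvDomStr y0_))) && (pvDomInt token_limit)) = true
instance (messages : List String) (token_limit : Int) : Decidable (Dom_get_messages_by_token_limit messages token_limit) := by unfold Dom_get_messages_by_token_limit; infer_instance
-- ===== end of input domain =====

-- B replaces A's early-break running-total loop with prefix sums, a count of sums within the limit, and a slice (alternative decomposition, same cost).

-- ===== PORT A =====
-- the for-loop with break: state = (current_group, current_tokens)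
def pvLoopA (token_limit : Int) : List String → List String → Int → List String
  | [], current_group, _ => current_group
  | message :: rest, current_group, current_tokens =>
      let tokens := PySem.Str.len message
      if current_tokens + tokens ≤ token_limit then
        pvLoopA token_limit rest (current_group ++ [message]) (current_tokens + tokens)
      else
        current_group

def get_messages_by_token_limit (messages : List String) (token_limit : Int) : List String :=
  pvLoopA token_limit messages [] 0

-- ===== PORT B =====
-- the prefix-sum building loop of Source B: state = (sums built so far via cons, total)
def pvSumsB : List String → Int → List Int
  | [], _ => []
  | m :: rest, total => (total + PySem.Str.len m) :: pvSumsB rest (total + PySem.Str.len m)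

def get_messages_by_token_limit_alt (messages : List String) (token_limit : Int) : List String :=
  let sums := pvSumsB messages 0
  let k := sums.countP (fun s => decide (s ≤ token_limit))
  PySem.List.slice messages none (some (k : Int))

-- ===== PRECONDITION & SPEC =====
def Spec_get_messages_by_token_limit (messages : List String) (token_limit : Int) (out : List String) : Prop := out = get_messages_by_token_limit_alt messages token_limit
instance (messages : List String) (token_limit : Int) (out : List String) : Decidable (Spec_get_messages_by_token_limit messages token_limit out) := by unfold Spec_get_messages_by_token_limit; infer_instance

-- ===== CLAIM (what is proved, stated in full; the proofs are below) =====
def Claim_equal_get_messages_by_token_limit : Prop := ∀ (messages : List String) (token_limit : Int), Dom_get_messages_by_token_limit messages token_limit → Spec_get_messages_by_token_limit messages token_limit (get_messages_by_token_limit messages token_limit)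

-- ===== LEMMAS AND PROOFS =====

theorem pvStrLen_nonneg (s : String) : 0 ≤ PySem.Str.len s := by
  simp [PySem.Str.len_eq]

-- prefix sums are bounded below by the starting total (lengths are non-negative)
theorem pvSumsB_ge (l : List String) (t : Int) : ∀ s ∈ pvSumsB l t, t ≤ s := by
  induction l generalizing t with
  | nil => simp [pvSumsB]
  | cons m rest ih =>
    intro s hs
    simp only [pvSumsB, List.mem_cons] at hs
    have hlen := pvStrLen_nonneg m
    rcases hs with h | h
    · omega
    · have := ih (t + PySem.Str.len m) s h; omega

theorem pvLoopA_eq (limit : Int) (l : List String) :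
    ∀ (group : List String) (cur : Int),
      pvLoopA limit l group cur =
        group ++ l.take ((pvSumsB l cur).countP (fun s => decide (s ≤ limit))) := by
  induction l with
  | nil => intro group cur; simp [pvLoopA, pvSumsB]
  | cons m rest ih =>
    intro group cur
    by_cases h : cur + PySem.Str.len m ≤ limit
    · simp only [pvLoopA, pvSumsB, List.countP_cons, h, decide_true]
      rw [ih]
      simp [List.take_succ_cons, List.append_assoc]
    · have hcnt : List.countP (fun s => decide (s ≤ limit)) (pvSumsB (m :: rest) cur) = 0 := by
        rw [List.countP_eq_zero]
        intro a ha
        simp only [pvSumsB, List.mem_cons] at ha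
        simp only [decide_eq_true_eq]
        rcases ha with rfl | ha
        · exact fun hle => h (by omega)
        · have := pvSumsB_ge rest (cur + PySem.Str.len m) a ha
          have hlen := pvStrLen_nonneg m
          intro hle; exact h (by omega)
      simp only [pvLoopA]
      rw [if_neg h, hcnt]
      simp

-- ===== VERDICT (by name: the statement is the Claim_ definition above) =====
theorem get_messages_by_token_limit_spec : Claim_equal_get_messages_by_token_limit := by
  intro messages token_limit _
  unfold Spec_get_messages_by_token_limit get_messages_by_token_limit get_messages_by_token_limit_alt
  rw [pvLoopA_eq, PySem.List.slice_to_natCast]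
  simp
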